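-- pv_equiv track=rewrite | github.com/AAuZZ/FedOrthrus | utils/util.py | local_cluster_collect_N_M
-- ===== SOURCE A (Python) =====
-- def local_cluster_collect_N_M(local_cluster_protos):
--     global_collected_protos = {}
--     global_collected_protos_N = {}
--     global_collected_protos_M_N = {}
--     for [idx, cluster_protos_label] in local_cluster_protos.items():
--         for [label, cluster_protos_list] in cluster_protos_label.items():
--             for i in range(len(cluster_protos_list)):
--                 if label in global_collected_protos.keys():
--                     global_collected_protos[label].append(cluster_protos_list[i])
--                     global_collected_protos_N[label].append(cluster_protos_list[i][:410])
--                     global_collected_protos_M_N[label].append(cluster_protos_list[i][410:])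
--                 else:
--                     global_collected_protos[label] = [cluster_protos_list[i]]
--                     global_collected_protos_N[label] = [cluster_protos_list[i][:410]]
--                     global_collected_protos_M_N[label] = [cluster_protos_list[i][410:]]
--
--     return  global_collected_protos_N, global_collected_protos_M_N
-- ===== SOURCE B (Python) =====
-- def local_cluster_collect_N_M(local_cluster_protos):
--     # Flatten the nested structure into one stream of (label, vector) pairs.
--     pairs = [(label, v)
--              for cluster_protos_label in local_cluster_protos.values()
--              for label, vectors in cluster_protos_label.items()
--              for v in vectors]
--     # Distinct labels in first-encounter order.
--     labels = []
--     for label, _ in pairs: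
--         if label not in labels:
--             labels.append(label)
--     # For each label, one scan of the flat stream per output dict.
--     protos_N = {l: [v[:410] for m, v in pairs if m == l] for l in labels}
--     protos_M_N = {l: [v[410:] for m, v in pairs if m == l] for l in labels}
--     return protos_N, protos_M_N
-- ===== Notes on version B (the rewrite author's own statement) =====
-- stated objective: alternative
-- what changed: B replaces A's fused single pass that maintains three label-keyed dicts in lockstep (membership branch + index loop) by a dict-free pipeline: flatten the nested structure into one flat list of (label, vector) pairs, collect the distinct labels in first-encounter order, then build each returned dict by filtering the flat stream per label and slicing; the unused full-vector dict disappears.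
import Mathlib
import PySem

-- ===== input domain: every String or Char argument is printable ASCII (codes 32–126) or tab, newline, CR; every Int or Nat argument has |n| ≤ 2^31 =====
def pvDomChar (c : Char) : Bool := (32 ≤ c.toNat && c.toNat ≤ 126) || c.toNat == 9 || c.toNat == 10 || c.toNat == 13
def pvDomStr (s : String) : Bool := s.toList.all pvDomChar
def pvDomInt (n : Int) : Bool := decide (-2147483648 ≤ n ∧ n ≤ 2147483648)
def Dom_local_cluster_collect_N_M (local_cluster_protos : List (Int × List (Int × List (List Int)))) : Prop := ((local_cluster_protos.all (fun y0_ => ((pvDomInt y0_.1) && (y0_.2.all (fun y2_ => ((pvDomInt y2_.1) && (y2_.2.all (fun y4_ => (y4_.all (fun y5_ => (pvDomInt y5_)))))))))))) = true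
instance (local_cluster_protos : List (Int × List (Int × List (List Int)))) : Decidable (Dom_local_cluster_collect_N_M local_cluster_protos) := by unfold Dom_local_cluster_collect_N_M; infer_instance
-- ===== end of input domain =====

-- B replaces A's fused loop keeping three label-keyed dicts in lockstep by a dict-free
-- pipeline: flatten to (label, vector) pairs, dedupe labels, filter the flat stream per label.

-- ===== PORT A =====
-- Port of A: one fused loop that keeps three dicts (full vectors, first-410 slices,
-- rest) in lockstep, branching on membership of the label in the first dict.
-- 'for i in range(len(lst)): lst[i]' visits exactly the elements in order → foldl over the list.
def local_cluster_collect_N_M (local_cluster_protos : List (Int × List (Int × List (List Int)))) : (List (Int × List (List Int))) × (List (Int × List (List Int))) :=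
  let st :=
    local_cluster_protos.foldl (fun st idx_cpl =>
      idx_cpl.2.foldl (fun st lab_lst =>
        lab_lst.2.foldl (fun st v =>
          if st.1.contains lab_lst.1 then
            (st.1.insert lab_lst.1 (st.1.getD lab_lst.1 [] ++ [v]),
             st.2.1.insert lab_lst.1 (st.2.1.getD lab_lst.1 [] ++ [PySem.List.slice v none (some 410)]),
             st.2.2.insert lab_lst.1 (st.2.2.getD lab_lst.1 [] ++ [PySem.List.slice v (some 410) none]))
          else
            (st.1.insert lab_lst.1 [v],
             st.2.1.insert lab_lst.1 [PySem.List.slice v none (some 410)],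
             st.2.2.insert lab_lst.1 [PySem.List.slice v (some 410) none])) st) st)
      ((PySem.Dict.empty, PySem.Dict.empty, PySem.Dict.empty) :
        PySem.Dict Int (List (List Int)) × PySem.Dict Int (List (List Int)) × PySem.Dict Int (List (List Int)))
  (st.2.1.items, st.2.2.items)

-- ===== PORT B =====
-- B: flatten the nested structure to a flat list of (label, vector) pairs (nested
-- comprehension → flatMap), collect distinct labels in first-encounter order
-- ('if label not in labels: labels.append(label)' = PySem.Set.add), then build each
-- returned dict by filtering the flat stream per label and slicing.
def local_cluster_collect_N_M_alt (local_cluster_protos : List (Int × List (Int × List (List Int)))) : (List (Int × List (List Int))) × (List (Int × List (List Int))) :=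
  let pairs : List (Int × List Int) :=
    local_cluster_protos.flatMap (fun idx_cpl =>
      idx_cpl.2.flatMap (fun lab_lst => lab_lst.2.map (fun v => (lab_lst.1, v))))
  let labels : PySem.Set Int :=
    pairs.foldl (fun s p => PySem.Set.add s p.1) PySem.Set.empty
  (labels.map (fun l => (l, (pairs.filter (fun p => p.1 == l)).map (fun p => PySem.List.slice p.2 none (some 410)))),
   labels.map (fun l => (l, (pairs.filter (fun p => p.1 == l)).map (fun p => PySem.List.slice p.2 (some 410) none))))

-- ===== PRECONDITION & SPEC =====
def Spec_local_cluster_collect_N_M (local_cluster_protos : List (Int × List (Int × List (List Int)))) (out : (List (Int × List (List Int))) × (List (Int × List (List Int)))) : Prop := out = local_cluster_collect_N_M_alt local_cluster_protos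
instance (local_cluster_protos : List (Int × List (Int × List (List Int)))) (out : (List (Int × List (List Int))) × (List (Int × List (List Int)))) : Decidable (Spec_local_cluster_collect_N_M local_cluster_protos out) := by unfold Spec_local_cluster_collect_N_M; infer_instance

-- ===== CLAIM =====
def Claim_equal_local_cluster_collect_N_M : Prop := ∀ (local_cluster_protos : List (Int × List (Int × List (List Int)))), Dom_local_cluster_collect_N_M local_cluster_protos → Spec_local_cluster_collect_N_M local_cluster_protos (local_cluster_collect_N_M local_cluster_protos)

-- ===== LEMMAS AND PROOFS =====

-- map a function over every stored vector list of a dict, keeping keys and order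
def pvMapVal (f : List Int → List Int) (d : PySem.Dict Int (List (List Int))) : PySem.Dict Int (List (List Int)) :=
  PySem.Dict.mk (d.items.map (fun kv => (kv.1, kv.2.map f)))

def pvFN (v : List Int) : List Int := PySem.List.slice v none (some 410)
def pvFM (v : List Int) : List Int := PySem.List.slice v (some 410) none

-- A's fold state as a function of the grouped dict
def pvPhi (g : PySem.Dict Int (List (List Int))) :
    PySem.Dict Int (List (List Int)) × PySem.Dict Int (List (List Int)) × PySem.Dict Int (List (List Int)) :=
  (g, pvMapVal pvFN g, pvMapVal pvFM g)

theorem pvContains_mapVal (f : List Int → List Int) (d : PySem.Dict Int (List (List Int))) (k : Int) :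
    (pvMapVal f d).contains k = d.contains k := by
  have hfe : ((fun p : Int × List (List Int) => p.1 == k) ∘ fun kv : Int × List (List Int) => (kv.1, kv.2.map f)) = (fun p : Int × List (List Int) => p.1 == k) := by
    funext p; rfl
  simp [pvMapVal, PySem.Dict.contains, List.any_map, hfe]

theorem pvGet?_mapVal (f : List Int → List Int) (d : PySem.Dict Int (List (List Int))) (k : Int) :
    (pvMapVal f d).get? k = (d.get? k).map (fun vs => vs.map f) := by
  obtain ⟨l⟩ := d
  induction l with
  | nil => simp [pvMapVal, PySem.Dict.get?]
  | cons p rest ih =>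
    simp only [pvMapVal, PySem.Dict.get?, List.map_cons, List.find?] at *
    by_cases h : p.1 = k
    · simp [h]
    · simp only [show (p.1 == k) = false by simp [h]]
      exact ih

theorem pvGetD_mapVal (f : List Int → List Int) (d : PySem.Dict Int (List (List Int))) (k : Int) :
    (pvMapVal f d).getD k [] = (d.getD k []).map f := by
  simp only [PySem.Dict.getD, pvGet?_mapVal]
  cases d.get? k <;> simp

theorem pvInsert_mapVal (f : List Int → List Int) (d : PySem.Dict Int (List (List Int))) (k : Int) (v : List (List Int)) :
    pvMapVal f (d.insert k v) = (pvMapVal f d).insert k (v.map f) := by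
  simp only [PySem.Dict.insert, pvContains_mapVal]
  by_cases h : d.contains k
  · simp only [h, if_true, pvMapVal, List.map_map]
    congr 1
    apply List.map_congr_left
    intro p _
    by_cases hp : p.1 = k <;> simp [hp]
  · simp [h, pvMapVal]

theorem pvStepA (g : PySem.Dict Int (List (List Int))) (l : Int) (v : List Int) :
    (if (pvPhi g).1.contains l then
      ((pvPhi g).1.insert l ((pvPhi g).1.getD l [] ++ [v]),
       (pvPhi g).2.1.insert l ((pvPhi g).2.1.getD l [] ++ [PySem.List.slice v none (some 410)]),
       (pvPhi g).2.2.insert l ((pvPhi g).2.2.getD l [] ++ [PySem.List.slice v (some 410) none]))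
    else
      ((pvPhi g).1.insert l [v],
       (pvPhi g).2.1.insert l [PySem.List.slice v none (some 410)],
       (pvPhi g).2.2.insert l [PySem.List.slice v (some 410) none]))
    = pvPhi (g.modify l [] (· ++ [v])) := by
  simp only [pvPhi, PySem.Dict.modify]
  by_cases h : g.contains l
  · simp [h, pvInsert_mapVal, pvGetD_mapVal, pvFN, pvFM]
  · have h0 : g.getD l [] = [] := PySem.Dict.getD_of_not_contains g [] (by simpa using h)
    simp [h, h0, pvInsert_mapVal, pvFN, pvFM]

theorem pvFoldl_phi {α β γ : Type} (Φ : α → β) (h : α → γ → α) (f : β → γ → β)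
    (H : ∀ a x, f (Φ a) x = Φ (h a x)) : ∀ (xs : List γ) (a : α), xs.foldl f (Φ a) = Φ (xs.foldl h a) := by
  intro xs
  induction xs with
  | nil => intro a; rfl
  | cons x xs ih => intro a; simp only [List.foldl_cons, H]; exact ih _

-- A's triple-nested fold equals pvPhi of the grouped-dict fold over the same structure
theorem pvA_eq_phi (lcp : List (Int × List (Int × List (List Int)))) :
    lcp.foldl (fun st idx_cpl =>
      idx_cpl.2.foldl (fun st lab_lst =>
        lab_lst.2.foldl (fun st v =>
          if st.1.contains lab_lst.1 then
            (st.1.insert lab_lst.1 (st.1.getD lab_lst.1 [] ++ [v]),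
             st.2.1.insert lab_lst.1 (st.2.1.getD lab_lst.1 [] ++ [PySem.List.slice v none (some 410)]),
             st.2.2.insert lab_lst.1 (st.2.2.getD lab_lst.1 [] ++ [PySem.List.slice v (some 410) none]))
          else
            (st.1.insert lab_lst.1 [v],
             st.2.1.insert lab_lst.1 [PySem.List.slice v none (some 410)],
             st.2.2.insert lab_lst.1 [PySem.List.slice v (some 410) none])) st) st) (pvPhi PySem.Dict.empty)
    = pvPhi (lcp.foldl (fun g idx_cpl =>
        idx_cpl.2.foldl (fun g lab_lst =>
          lab_lst.2.foldl (fun g v => g.modify lab_lst.1 [] (· ++ [v])) g) g) PySem.Dict.empty) := by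
  have inner : ∀ (l : Int) (vs : List (List Int)) (g : PySem.Dict Int (List (List Int))),
      vs.foldl (fun st v =>
        if st.1.contains l then
          (st.1.insert l (st.1.getD l [] ++ [v]),
           st.2.1.insert l (st.2.1.getD l [] ++ [PySem.List.slice v none (some 410)]),
           st.2.2.insert l (st.2.2.getD l [] ++ [PySem.List.slice v (some 410) none]))
        else
          (st.1.insert l [v],
           st.2.1.insert l [PySem.List.slice v none (some 410)],
           st.2.2.insert l [PySem.List.slice v (some 410) none])) (pvPhi g)
      = pvPhi (vs.foldl (fun g v => g.modify l [] (· ++ [v])) g) := by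
    intro l vs g
    exact pvFoldl_phi pvPhi _ _ (fun a v => pvStepA a l v) vs g
  have mid : ∀ (cpl : List (Int × List (List Int))) (g : PySem.Dict Int (List (List Int))),
      cpl.foldl (fun st lab_lst =>
        lab_lst.2.foldl (fun st v =>
          if st.1.contains lab_lst.1 then
            (st.1.insert lab_lst.1 (st.1.getD lab_lst.1 [] ++ [v]),
             st.2.1.insert lab_lst.1 (st.2.1.getD lab_lst.1 [] ++ [PySem.List.slice v none (some 410)]),
             st.2.2.insert lab_lst.1 (st.2.2.getD lab_lst.1 [] ++ [PySem.List.slice v (some 410) none]))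
          else
            (st.1.insert lab_lst.1 [v],
             st.2.1.insert lab_lst.1 [PySem.List.slice v none (some 410)],
             st.2.2.insert lab_lst.1 [PySem.List.slice v (some 410) none])) st) (pvPhi g)
      = pvPhi (cpl.foldl (fun g lab_lst =>
          lab_lst.2.foldl (fun g v => g.modify lab_lst.1 [] (· ++ [v])) g) g) := by
    intro cpl g
    exact pvFoldl_phi pvPhi _ _ (fun a x => inner x.1 x.2 a) cpl g
  exact pvFoldl_phi pvPhi _ _ (fun a x => mid x.2 a) lcp PySem.Dict.empty

-- the flat pair stream B builds
def pvPairs (lcp : List (Int × List (Int × List (List Int)))) : List (Int × List Int) :=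
  lcp.flatMap (fun idx_cpl =>
    idx_cpl.2.flatMap (fun lab_lst => lab_lst.2.map (fun v => (lab_lst.1, v))))

-- the nested grouped-dict fold equals the flat fold over pvPairs
theorem pvGrouped_eq_flat (lcp : List (Int × List (Int × List (List Int)))) :
    lcp.foldl (fun g idx_cpl =>
      idx_cpl.2.foldl (fun g lab_lst =>
        lab_lst.2.foldl (fun g v => g.modify lab_lst.1 [] (· ++ [v])) g) g) PySem.Dict.empty
    = (pvPairs lcp).foldl (fun g p => g.modify p.1 [] (· ++ [p.2])) PySem.Dict.empty := by
  unfold pvPairs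
  rw [List.foldl_flatMap]
  apply PySem.List.foldl_congr_mem
  intro g idx_cpl _
  rw [List.foldl_flatMap]
  apply PySem.List.foldl_congr_mem
  intro g lab_lst _
  rw [List.foldl_map]

-- ===== VERDICT =====
theorem local_cluster_collect_N_M_spec : Claim_equal_local_cluster_collect_N_M := by
  intro lcp _
  unfold Spec_local_cluster_collect_N_M local_cluster_collect_N_M local_cluster_collect_N_M_alt
  show (_, _) = _
  rw [show ((PySem.Dict.empty, PySem.Dict.empty, PySem.Dict.empty) :
      PySem.Dict Int (List (List Int)) × PySem.Dict Int (List (List Int)) × PySem.Dict Int (List (List Int)))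
      = pvPhi PySem.Dict.empty from rfl, pvA_eq_phi, pvGrouped_eq_flat]
  set ps := pvPairs lcp with hps
  set g := ps.foldl (fun g p => g.modify p.1 [] (· ++ [p.2])) PySem.Dict.empty with hg
  have hnd : g.keys.Nodup := by
    rw [hg]
    exact PySem.Dict.nodup_keys_foldl_modify_key ps Prod.fst [] (fun _ p => (· ++ [p.2])) PySem.Dict.empty (by simp)
  have hkeys : g.keys = ps.foldl (fun s p => PySem.Set.add s p.1) PySem.Set.empty := by
    rw [hg, PySem.Dict.keys_foldl_modify_key, ← PySem.Set.update_map_eq_foldl_add]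
    rfl
  have hget : ∀ k, g.getD k [] = (ps.filter (fun p => p.1 == k)).map (·.2) := by
    intro k
    rw [hg, PySem.Dict.getD_foldl_modify_append]
    simp
  have hitems : ∀ f : List Int → List Int,
      (pvMapVal f g).items
      = (ps.foldl (fun s p => PySem.Set.add s p.1) PySem.Set.empty).map
          (fun l => (l, (ps.filter (fun p => p.1 == l)).map (fun p => f p.2))) := by
    intro f
    show (g.items.map (fun kv => (kv.1, kv.2.map f))) = _
    rw [PySem.Dict.items_eq_map_keys g hnd [], List.map_map, hkeys]
    apply List.map_congr_left
    intro l _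
    simp [Function.comp, hget l, List.map_map, Function.comp]
  simp only [pvPhi]
  exact Prod.ext (hitems pvFN) (hitems pvFM)
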